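-- pv_equiv track=rewrite | github.com/stephen1776/String-Algorithms | BS12_GRPH/BS12_GRPH.py | overlapGraphs
-- ===== SOURCE A (Python) =====
-- def overlapGraphs(dna):
--     for h1, s1 in dna.items():
--         suffix = s1[-3:]
--         for h2, s2 in dna.items():
--             prefix = s2[:3]
--             if s1 != s2:
--                 if suffix == prefix:
--                     yield (' '.join([h1, h2]))
-- ===== SOURCE B (Python) =====
-- def overlapGraphs(dna):
--     # Index fragments by their 3-char prefix once, then look up each suffix's bucket.
--     index = {}
--     for h2, s2 in dna.items():
--         index.setdefault(s2[:3], []).append((h2, s2))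
--     for h1, s1 in dna.items():
--         for h2, s2 in index.get(s1[-3:], []):
--             if s2 != s1:
--                 yield (' '.join([h1, h2]))
-- ===== Notes on version B (the rewrite author's own statement) =====
-- stated objective: faster
-- what changed: B replaces A's nested scan over all pairs by a dict bucketing every fragment under its 3-char prefix once, then looks up each suffix's bucket.
import Mathlib
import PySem

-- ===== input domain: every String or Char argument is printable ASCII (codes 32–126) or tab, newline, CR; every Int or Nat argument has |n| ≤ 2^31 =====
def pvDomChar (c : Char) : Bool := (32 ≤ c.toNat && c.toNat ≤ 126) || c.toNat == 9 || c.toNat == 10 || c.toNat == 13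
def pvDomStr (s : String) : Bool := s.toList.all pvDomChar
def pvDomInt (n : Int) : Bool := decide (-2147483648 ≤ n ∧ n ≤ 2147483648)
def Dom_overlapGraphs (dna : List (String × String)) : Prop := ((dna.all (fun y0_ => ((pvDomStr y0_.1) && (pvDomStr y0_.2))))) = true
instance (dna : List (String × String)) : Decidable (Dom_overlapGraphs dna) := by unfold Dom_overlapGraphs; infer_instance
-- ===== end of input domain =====

-- B indexes fragments by 3-char prefix in one dict pass, then looks up each suffix's bucket (asymptotically faster than A's nested scan).
-- ===== PORT A =====
def overlapGraphs (dna : List (String × String)) : List String :=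
  dna.foldl (fun acc z =>
    let suffix := PySem.Str.slice z.2 (some (-3)) none
    dna.foldl (fun acc2 w =>
      let pre := PySem.Str.slice w.2 none (some 3)
      if z.2 ≠ w.2 then
        if suffix = pre then acc2 ++ [PySem.Str.join " " [z.1, w.1]] else acc2
      else acc2) acc) []

-- ===== PORT B =====
def overlapGraphs_alt (dna : List (String × String)) : List String :=
  let index : PySem.Dict String (List (String × String)) :=
    dna.foldl (fun d w => d.modify (PySem.Str.slice w.2 none (some 3)) [] (· ++ [w])) PySem.Dict.empty
  dna.foldl (fun acc z =>
    (index.getD (PySem.Str.slice z.2 (some (-3)) none) []).foldl (fun acc2 w =>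
      if w.2 ≠ z.2 then acc2 ++ [PySem.Str.join " " [z.1, w.1]] else acc2) acc) []

-- ===== PRECONDITION & SPEC =====
def Spec_overlapGraphs (dna : List (String × String)) (out : List String) : Prop := out = overlapGraphs_alt dna
instance (dna : List (String × String)) (out : List String) : Decidable (Spec_overlapGraphs dna out) := by unfold Spec_overlapGraphs; infer_instance

-- ===== CLAIM (what is proved, stated in full; the proofs are below) =====
def Claim_equal_overlapGraphs : Prop := ∀ (dna : List (String × String)), Dom_overlapGraphs dna → Spec_overlapGraphs dna (overlapGraphs dna)

-- ===== LEMMAS AND PROOFS =====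

-- the bucket of B's index at key p is exactly the fragments whose 3-char prefix is p, in order
theorem index_getD (dna : List (String × String)) (p : String) :
    (dna.foldl (fun d w => d.modify (PySem.Str.slice w.2 none (some 3)) [] (· ++ [w]))
      (PySem.Dict.empty : PySem.Dict String (List (String × String)))).getD p []
    = dna.filter (fun w => PySem.Str.slice w.2 none (some 3) == p) := by
  have h := PySem.Dict.getD_foldl_modify_append
      (l := dna.map (fun w => (PySem.Str.slice w.2 none (some 3), w)))
      (d := (PySem.Dict.empty : PySem.Dict String (List (String × String)))) (c := p)
  rw [List.foldl_map] at h
  simp only [h, PySem.Dict.getD_empty, List.nil_append, List.filter_map]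
  rw [List.map_map]
  simp [Function.comp_def]

-- A's inner loop over dna equals B's inner loop over the bucket for that suffix
theorem inner_eq (dna : List (String × String)) (z : String × String) (acc : List String) :
    dna.foldl (fun acc2 w =>
      if z.2 ≠ w.2 then
        if PySem.Str.slice z.2 (some (-3)) none = PySem.Str.slice w.2 none (some 3) then
          acc2 ++ [PySem.Str.join " " [z.1, w.1]] else acc2
      else acc2) acc
    = (dna.filter (fun w => PySem.Str.slice w.2 none (some 3) == PySem.Str.slice z.2 (some (-3)) none)).foldl
        (fun acc2 w => if w.2 ≠ z.2 then acc2 ++ [PySem.Str.join " " [z.1, w.1]] else acc2) acc := by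
  have hstep : (fun (acc2 : List String) (w : String × String) =>
      if z.2 ≠ w.2 then
        if PySem.Str.slice z.2 (some (-3)) none = PySem.Str.slice w.2 none (some 3) then
          acc2 ++ [PySem.Str.join " " [z.1, w.1]] else acc2
      else acc2)
    = (fun acc2 w =>
        if (decide (z.2 ≠ w.2) && decide (PySem.Str.slice z.2 (some (-3)) none = PySem.Str.slice w.2 none (some 3))) then
          acc2 ++ [PySem.Str.join " " [z.1, w.1]] else acc2) := by
    funext acc2 w
    by_cases h1 : z.2 = w.2 <;> by_cases h2 : PySem.Str.slice z.2 (some (-3)) none = PySem.Str.slice w.2 none (some 3) <;>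
      simp [h1, h2]
  have hstep2 : (fun (acc2 : List String) (w : String × String) =>
      if w.2 ≠ z.2 then acc2 ++ [PySem.Str.join " " [z.1, w.1]] else acc2)
    = (fun acc2 w => if decide (w.2 ≠ z.2) = true then acc2 ++ [PySem.Str.join " " [z.1, w.1]] else acc2) := by
    funext acc2 w; by_cases h : w.2 = z.2 <;> simp [h]
  rw [hstep, hstep2]
  simp only [PySem.List.foldl_append_if, List.filter_filter]
  congr 1
  congr 1
  apply List.filter_congr
  intro w _
  by_cases h1 : z.2 = w.2
  · simp [h1]
  · have h1' : w.2 ≠ z.2 := Ne.symm h1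
    by_cases h2 : PySem.Str.slice z.2 (some (-3)) none = PySem.Str.slice w.2 none (some 3)
    · rw [h2]
      simp [h1, h1']
    · have h2' : PySem.Str.slice w.2 none (some 3) ≠ PySem.Str.slice z.2 (some (-3)) none := fun h => h2 h.symm
      simp [h1, h2, h2']

-- ===== VERDICT (by name: the statement is the Claim_ definition above) =====
theorem overlapGraphs_spec : Claim_equal_overlapGraphs := by
  intro dna _
  unfold Spec_overlapGraphs overlapGraphs overlapGraphs_alt
  congr 1
  funext acc z
  rw [inner_eq, index_getD]
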